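-- pv_equiv track=rewrite | github.com/grandmasteri/pycamtasia | docs/development/reviews/repros/REV-red_team-001.py | build_nested_json
-- ===== SOURCE A (Python) =====
-- def build_nested_json(depth: int) -> str:
--     """Build a valid .tscproj JSON string with deeply nested groups."""
--     leaf = (
--         '{"id":0,"_type":"AMFile","start":0,"duration":100,"src":0,'
--         '"mediaStart":0,"mediaDuration":100,"scalar":1,'
--         '"metadata":{},"animationTracks":{},"parameters":{},"effects":[]}'
--     )
--     current = leaf
--     for i in range(1, depth + 1):
--         current = (
--             f'{{"id":{i},"_type":"Group","start":0,"duration":100,'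
--             f'"mediaStart":0,"mediaDuration":100,"scalar":1,'
--             f'"metadata":{{}},"animationTracks":{{}},"parameters":{{}},"effects":[],'
--             f'"tracks":[{{"trackIndex":0,"medias":[{current}]}}]}}'
--         )
--     return (
--         f'{{"timeline":{{"sceneTrack":{{"scenes":[{{"csml":{{"tracks":['
--         f'{{"trackIndex":0,"medias":[{current}]}}]}}}}]}},"parameters":{{}}}},'
--         f'"sourceBin":[]}}'
--     )
-- ===== SOURCE B (Python) =====
-- def build_nested_json(depth: int) -> str:
--     """Build a valid .tscproj JSON string with deeply nested groups."""
--     leaf = (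
--         '{"id":0,"_type":"AMFile","start":0,"duration":100,"src":0,'
--         '"mediaStart":0,"mediaDuration":100,"scalar":1,'
--         '"metadata":{},"animationTracks":{},"parameters":{},"effects":[]}'
--     )
--     headers = "".join(
--         f'{{"id":{i},"_type":"Group","start":0,"duration":100,'
--         f'"mediaStart":0,"mediaDuration":100,"scalar":1,'
--         f'"metadata":{{}},"animationTracks":{{}},"parameters":{{}},"effects":[],'
--         f'"tracks":[{{"trackIndex":0,"medias":['
--         for i in range(depth, 0, -1)
--     )
--     closers = "]}]}" * max(depth, 0)
--     return (
--         '{"timeline":{"sceneTrack":{"scenes":[{"csml":{"tracks":['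
--         '{"trackIndex":0,"medias":[' + headers + leaf + closers +
--         ']}]}}]},"parameters":{}},"sourceBin":[]}'
--     )
-- ===== Notes on version B (the rewrite author's own statement) =====
-- stated objective: faster
-- what changed: B builds the string front-to-back in one pass (join of per-level group headers, then the leaf, then depth repeated ']}]}'' closers) instead of A's inside-out loop that re-copies the whole growing string at every level.
import Mathlib
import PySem

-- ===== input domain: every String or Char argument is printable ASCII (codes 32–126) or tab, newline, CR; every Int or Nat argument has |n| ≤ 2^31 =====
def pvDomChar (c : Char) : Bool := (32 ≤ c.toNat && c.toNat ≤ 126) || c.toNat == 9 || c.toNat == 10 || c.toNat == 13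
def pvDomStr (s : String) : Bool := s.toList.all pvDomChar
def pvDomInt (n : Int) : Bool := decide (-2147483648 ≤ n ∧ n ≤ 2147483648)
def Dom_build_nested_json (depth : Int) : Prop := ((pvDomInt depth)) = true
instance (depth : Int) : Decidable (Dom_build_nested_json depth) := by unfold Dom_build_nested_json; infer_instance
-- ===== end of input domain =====

-- B builds the same .tscproj string front-to-back (join of per-level headers, leaf, repeated closers)
-- instead of A's inside-out repeated wrapping; objective: alternative construction (linear concatenation).

-- ===== PORT A =====
-- A's loop body: current = f'{{"id":{i},...,"medias":[{current}]}}]}}'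
def pvWrapA (i : Int) (current : String) : String :=
  "{\"id\":" ++ PySem.Int.toStr i ++ ",\"_type\":\"Group\",\"start\":0,\"duration\":100,\"mediaStart\":0,\"mediaDuration\":100,\"scalar\":1,\"metadata\":{},\"animationTracks\":{},\"parameters\":{},\"effects\":[],\"tracks\":[{\"trackIndex\":0,\"medias\":[" ++ current ++ "]}]}"

def build_nested_json (depth : Int) : String :=
  let leaf := "{\"id\":0,\"_type\":\"AMFile\",\"start\":0,\"duration\":100,\"src\":0,\"mediaStart\":0,\"mediaDuration\":100,\"scalar\":1,\"metadata\":{},\"animationTracks\":{},\"parameters\":{},\"effects\":[]}"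
  let current := (PySem.List.pyRange 1 (depth + 1) 1).foldl (fun cur i => pvWrapA i cur) leaf
  "{\"timeline\":{\"sceneTrack\":{\"scenes\":[{\"csml\":{\"tracks\":[{\"trackIndex\":0,\"medias\":[" ++ current ++ "]}]}}]},\"parameters\":{}},\"sourceBin\":[]}"

-- ===== PORT B =====
-- one per-level header of B's generator expression
def pvHdrB (i : Int) : String :=
  "{\"id\":" ++ PySem.Int.toStr i ++ ",\"_type\":\"Group\",\"start\":0,\"duration\":100,\"mediaStart\":0,\"mediaDuration\":100,\"scalar\":1,\"metadata\":{},\"animationTracks\":{},\"parameters\":{},\"effects\":[],\"tracks\":[{\"trackIndex\":0,\"medias\":["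

def build_nested_json_alt (depth : Int) : String :=
  let leaf := "{\"id\":0,\"_type\":\"AMFile\",\"start\":0,\"duration\":100,\"src\":0,\"mediaStart\":0,\"mediaDuration\":100,\"scalar\":1,\"metadata\":{},\"animationTracks\":{},\"parameters\":{},\"effects\":[]}"
  let headers := PySem.Str.join "" ((PySem.List.pyRange depth 0 (-1)).map pvHdrB)
  let closers := PySem.Str.join "" (List.replicate (max depth 0).toNat "]}]}")
  "{\"timeline\":{\"sceneTrack\":{\"scenes\":[{\"csml\":{\"tracks\":[{\"trackIndex\":0,\"medias\":[" ++ headers ++ leaf ++ closers ++ "]}]}}]},\"parameters\":{}},\"sourceBin\":[]}"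

-- ===== PRECONDITION & SPEC =====
def Spec_build_nested_json (depth : Int) (out : String) : Prop := out = build_nested_json_alt depth
instance (depth : Int) (out : String) : Decidable (Spec_build_nested_json depth out) := by unfold Spec_build_nested_json; infer_instance

-- ===== CLAIM (what is proved, stated in full; the proofs are below) =====
def Claim_equal_build_nested_json : Prop := ∀ (depth : Int), Dom_build_nested_json depth → Spec_build_nested_json depth (build_nested_json depth)

-- ===== LEMMAS AND PROOFS =====
theorem pvJoinNil : PySem.Str.join "" ([] : List String) = "" := by
  rw [← String.toList_inj]
  simp [PySem.Str.toList_join, PySem.Chars.join, List.intercalate]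

theorem pvJoinCons (p : String) (rest : List String) :
    PySem.Str.join "" (p :: rest) = p ++ PySem.Str.join "" rest := by
  cases rest with
  | nil =>
    rw [← String.toList_inj]
    simp [PySem.Str.toList_join, PySem.Chars.join, List.intercalate]
  | cons q r =>
    rw [← String.toList_inj]
    rw [PySem.Str.toList_join, List.map_cons, List.map_cons, PySem.Chars.join_cons_cons]
    simp [PySem.Str.toList_join]

-- the repeated closer commutes with one more copy of itself
theorem pvRepSwap (n : Nat) (s : String) :
    PySem.Str.join "" (List.replicate n s) ++ s = s ++ PySem.Str.join "" (List.replicate n s) := by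
  induction n with
  | zero => simp [pvJoinNil]
  | succ k ih =>
    rw [List.replicate_succ, pvJoinCons, String.append_assoc, ih, ← String.append_assoc]

-- core: A's inside-out fold equals headers ++ leaf ++ closers, for depth = n ≥ 0
theorem pvCore (n : Nat) :
    (PySem.List.pyRange 1 ((n : Int) + 1) 1).foldl (fun cur i => pvWrapA i cur) "{\"id\":0,\"_type\":\"AMFile\",\"start\":0,\"duration\":100,\"src\":0,\"mediaStart\":0,\"mediaDuration\":100,\"scalar\":1,\"metadata\":{},\"animationTracks\":{},\"parameters\":{},\"effects\":[]}"
      = PySem.Str.join "" ((PySem.List.pyRange (n : Int) 0 (-1)).map pvHdrB)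
        ++ "{\"id\":0,\"_type\":\"AMFile\",\"start\":0,\"duration\":100,\"src\":0,\"mediaStart\":0,\"mediaDuration\":100,\"scalar\":1,\"metadata\":{},\"animationTracks\":{},\"parameters\":{},\"effects\":[]}"
        ++ PySem.Str.join "" (List.replicate n "]}]}") := by
  induction n with
  | zero =>
    rw [PySem.List.pyRange_one_eq_nil (by omega), PySem.List.pyRange_neg_one_eq_nil (by omega)]
    simp [pvJoinNil]
  | succ k ih =>
    have h1 : ((k + 1 : Nat) : Int) + 1 = ((k : Int) + 1) + 1 := by push_cast; ring
    rw [h1, PySem.List.pyRange_one_succ_right (by omega), List.foldl_append]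
    have h2 : ((k + 1 : Nat) : Int) = (k : Int) + 1 := by push_cast; ring
    rw [h2, PySem.List.pyRange_neg_one_cons (by omega)]
    have h3 : (k : Int) + 1 - 1 = (k : Int) := by ring
    rw [h3, List.map_cons, pvJoinCons, List.replicate_succ, pvJoinCons]
    simp only [List.foldl_cons, List.foldl_nil]
    rw [ih]
    simp only [pvWrapA, pvHdrB, String.append_assoc]
    rw [pvRepSwap]

-- ===== VERDICT (by name: the statement is the Claim_ definition above) =====
theorem build_nested_json_spec : Claim_equal_build_nested_json := by
  intro depth _
  simp only [Spec_build_nested_json, build_nested_json, build_nested_json_alt]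
  by_cases h : depth ≤ 0
  · have hm : (max depth 0).toNat = 0 := by omega
    rw [PySem.List.pyRange_one_eq_nil (by omega), PySem.List.pyRange_neg_one_eq_nil (by omega), hm]
    simp [pvJoinNil]
  · obtain ⟨n, rfl⟩ : ∃ n : Nat, depth = (n : Int) := ⟨depth.toNat, by omega⟩
    have hm : (max ((n : Int)) 0).toNat = n := by omega
    rw [hm, pvCore n]
    simp [String.append_assoc]
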